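-- pv_equiv track=rewrite | github.com/madamore-1/NLP_Class | Week 8/lab8.py | NOT_features
-- ===== SOURCE A (Python) =====
-- def NOT_features(document, word_features, negationwords):
--     features = {f'V_{word}': False for word in word_features}
--     features.update({f'V_NOT{word}': False for word in word_features})
--     for i in range(len(document)):
--         word = document[i]
--         if ((i + 1) < len(document)) and ((word in negationwords) or (word.endswith("n't"))):
--             i += 1
--             if document[i] in word_features:
--                 features[f'V_NOT{document[i]}'] = True
--         elif word in word_features:
--             features[f'V_{word}'] = True
--     return features
-- ===== SOURCE B (Python) =====
-- def NOT_features(document, word_features, negationwords):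
--     negset = set(negationwords)
--
--     def is_neg(w):
--         return w in negset or w.endswith("n't")
--
--     n = len(document)
--     # words receiving a V_NOT mark: any word directly preceded by a negation trigger
--     not_marked = {document[j] for j in range(1, n) if is_neg(document[j - 1])}
--     # words receiving a V_ mark: any word that is not a negation trigger with a successor
--     v_marked = {document[j] for j in range(n) if j == n - 1 or not is_neg(document[j])}
--     features = {'V_' + w: w in v_marked for w in word_features}
--     features.update({'V_NOT' + w: w in not_marked for w in word_features})
--     return features
-- ===== Notes on version B (the rewrite author's own statement) =====
-- stated objective: faster
-- what changed: Instead of mutating the feature dict while scanning with look-ahead and if/elif, B first computes the two sets of marked words (look-behind for negated words, plus the non-negation/trailing words) with set-based membership tests, then builds the dict once with its final boolean values.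
import Mathlib
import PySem

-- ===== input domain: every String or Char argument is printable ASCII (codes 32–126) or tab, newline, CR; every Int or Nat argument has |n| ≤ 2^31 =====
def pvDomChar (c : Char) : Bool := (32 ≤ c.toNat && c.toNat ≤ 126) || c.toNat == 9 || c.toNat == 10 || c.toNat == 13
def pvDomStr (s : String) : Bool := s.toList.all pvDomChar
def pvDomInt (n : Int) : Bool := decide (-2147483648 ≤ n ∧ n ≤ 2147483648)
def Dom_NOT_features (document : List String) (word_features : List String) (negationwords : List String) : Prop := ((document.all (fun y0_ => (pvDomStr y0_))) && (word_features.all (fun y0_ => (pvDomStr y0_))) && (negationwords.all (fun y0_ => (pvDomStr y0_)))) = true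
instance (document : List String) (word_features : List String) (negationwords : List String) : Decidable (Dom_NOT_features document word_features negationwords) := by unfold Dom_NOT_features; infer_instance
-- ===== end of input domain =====

-- B computes the two sets of marked words first (look-behind) and builds the feature dict once with
-- final values, replacing A's look-ahead if/elif dict mutation; set-based membership tests.


-- ===== PORT A =====
-- the body of A's for-loop (i ranges over range(len(document)))
def pvAStep (document word_features negationwords : List String) (d : PySem.Dict String Bool) (i : Int) : PySem.Dict String Bool :=
  if (decide (i + 1 < (document.length : Int))) &&
     (decide (PySem.List.pyGetD document i "" ∈ negationwords) || PySem.Str.endswith (PySem.List.pyGetD document i "") "n't") then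
    (if decide (PySem.List.pyGetD document (i + 1) "" ∈ word_features) then
      d.insert ("V_NOT" ++ PySem.List.pyGetD document (i + 1) "") true
    else d)
  else if decide (PySem.List.pyGetD document i "" ∈ word_features) then
    d.insert ("V_" ++ PySem.List.pyGetD document i "") true
  else d

def NOT_features (document : List String) (word_features : List String) (negationwords : List String) : List (String × Bool) :=
  ((PySem.List.pyRange 0 (document.length : Int) 1).foldl (pvAStep document word_features negationwords)
    (word_features.foldl (fun d w => d.insert ("V_NOT" ++ w) false)
      (word_features.foldl (fun d w => d.insert ("V_" ++ w) false) PySem.Dict.empty))).items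

-- ===== PORT B =====
-- is_neg(w): w in negset or w.endswith("n't")
def pvIsNegB (negationwords : List String) (w : String) : Bool :=
  decide (w ∈ PySem.Set.ofList negationwords) || PySem.Str.endswith w "n't"

-- {document[j] for j in range(1, n) if is_neg(document[j-1])}
def pvNotMarked (document negationwords : List String) : PySem.Set String :=
  PySem.Set.ofList
    (((PySem.List.pyRange 1 (document.length : Int) 1).filter
        (fun j => pvIsNegB negationwords (PySem.List.pyGetD document (j - 1) ""))).map
      (fun j => PySem.List.pyGetD document j ""))

-- {document[j] for j in range(n) if j == n - 1 or not is_neg(document[j])}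
def pvVMarked (document negationwords : List String) : PySem.Set String :=
  PySem.Set.ofList
    (((PySem.List.pyRange 0 (document.length : Int) 1).filter
        (fun j => decide (j = (document.length : Int) - 1) || !pvIsNegB negationwords (PySem.List.pyGetD document j ""))).map
      (fun j => PySem.List.pyGetD document j ""))

def NOT_features_alt (document : List String) (word_features : List String) (negationwords : List String) : List (String × Bool) :=
  (word_features.foldl (fun d w => d.insert ("V_NOT" ++ w) (decide (w ∈ pvNotMarked document negationwords)))
    (word_features.foldl (fun d w => d.insert ("V_" ++ w) (decide (w ∈ pvVMarked document negationwords)))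
      PySem.Dict.empty)).items

-- ===== PRECONDITION & SPEC =====
-- Pre_ excludes word_features containing both some word u and "NOT" ++ u: there the keys 'V_NOTu' and
-- 'V_' + ('NOTu') collide in the feature dict, and which boolean the colliding key ends up with is an
-- accidental, equally defensible corner that no caller would specify (A merges the two marks, B keeps
-- the V_NOT one).
def Pre_NOT_features (document : List String) (word_features : List String) (negationwords : List String) : Prop :=
  ∀ u ∈ word_features, ("NOT" ++ u) ∉ word_features
instance (document : List String) (word_features : List String) (negationwords : List String) : Decidable (Pre_NOT_features document word_features negationwords) := by unfold Pre_NOT_features; infer_instance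

def pvWitness_NOT_features : List String × List String × List String :=
  (["not", "good", "bad"], ["good", "bad"], ["not"])

def Spec_NOT_features (document : List String) (word_features : List String) (negationwords : List String) (out : List (String × Bool)) : Prop := out = NOT_features_alt document word_features negationwords
instance (document : List String) (word_features : List String) (negationwords : List String) (out : List (String × Bool)) : Decidable (Spec_NOT_features document word_features negationwords out) := by unfold Spec_NOT_features; infer_instance

-- ===== CLAIM (what is proved, stated in full; the proofs are below) =====
def Claim_equal_NOT_features : Prop := ∀ (document : List String) (word_features : List String) (negationwords : List String), Dom_NOT_features document word_features negationwords → Pre_NOT_features document word_features negationwords → Spec_NOT_features document word_features negationwords (NOT_features document word_features negationwords)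

-- ===== LEMMAS AND PROOFS =====

-- keys of the form "V_" ++ w cancel on the left
theorem pvKey_inj {a b : String} (h : "V_" ++ a = "V_" ++ b) : a = b :=
  (String.append_right_inj "V_").mp h

theorem pvVNOT_eq (w : String) : "V_NOT" ++ w = "V_" ++ ("NOT" ++ w) := by
  rw [← String.append_assoc]
  congr 1

-- a fold of inserts whose keys all avoid k leaves the lookup at k unchanged
theorem pvGetD_fold_insert_not_mem (f : String → String) (g : String → Bool)
    (l : List String) (d : PySem.Dict String Bool) (k : String)
    (h : ∀ w ∈ l, f w ≠ k) :
    (l.foldl (fun d w => d.insert (f w) (g w)) d).getD k false = d.getD k false := by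
  induction l generalizing d with
  | nil => rfl
  | cons x t ih =>
    simp only [List.foldl_cons]
    rw [ih _ (fun w hw => h w (List.mem_cons_of_mem _ hw)),
        PySem.Dict.getD_insert]
    simp [(h x (List.mem_cons_self)).symm]

-- a fold of inserts keyed injectively: the lookup at f w returns g w
theorem pvGetD_fold_insert_mem (f : String → String) (g : String → Bool)
    (l : List String) (d : PySem.Dict String Bool) (w : String)
    (hw : w ∈ l) (hinj : ∀ a ∈ l, f a = f w → a = w) :
    (l.foldl (fun d w => d.insert (f w) (g w)) d).getD (f w) false = g w := by
  induction l generalizing d with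
  | nil => cases hw
  | cons x t ih =>
    simp only [List.foldl_cons]
    by_cases hwt : w ∈ t
    · exact ih _ hwt (fun a ha => hinj a (List.mem_cons_of_mem _ ha))
    · have hx : x = w := by
        rcases List.mem_cons.mp hw with h | h
        · exact h.symm
        · exact absurd h hwt
      subst hx
      rw [pvGetD_fold_insert_not_mem _ g t _ _
          (fun a ha hfa => hwt ((hinj a (List.mem_cons_of_mem _ ha) hfa) ▸ ha)),
        PySem.Dict.getD_insert]
      simp

-- a fold of inserts with value false keeps every lookup-with-default-false at false
theorem pvGetD_fold_false (f : String → String) (l : List String)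
    (d : PySem.Dict String Bool) (h : ∀ k, d.getD k false = false) (k : String) :
    (l.foldl (fun d w => d.insert (f w) false) d).getD k false = false := by
  induction l generalizing d with
  | nil => exact h k
  | cons x t ih =>
    simp only [List.foldl_cons]
    refine ih _ (fun k' => ?_)
    rw [PySem.Dict.getD_insert]
    split <;> simp [h]

-- the boolean "this loop iteration sets key k to True"
def pvAHit (document word_features negationwords : List String) (i : Int) (k : String) : Bool :=
  if (decide (i + 1 < (document.length : Int))) &&
     (decide (PySem.List.pyGetD document i "" ∈ negationwords) || PySem.Str.endswith (PySem.List.pyGetD document i "") "n't") then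
    decide (PySem.List.pyGetD document (i + 1) "" ∈ word_features) &&
      (k == "V_NOT" ++ PySem.List.pyGetD document (i + 1) "")
  else decide (PySem.List.pyGetD document i "" ∈ word_features) && (k == "V_" ++ PySem.List.pyGetD document i "")

theorem pvAStep_getD (document word_features negationwords : List String)
    (d : PySem.Dict String Bool) (i : Int) (k : String) :
    (pvAStep document word_features negationwords d i).getD k false
      = (d.getD k false || pvAHit document word_features negationwords i k) := by
  unfold pvAStep pvAHit
  split
  · split
    · rw [PySem.Dict.getD_insert]
      rename_i hmem
      simp only [hmem, Bool.true_and]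
      split <;> simp_all
    · rename_i hmem
      simp only [Bool.not_eq_true] at hmem
      simp [hmem]
  · split
    · rw [PySem.Dict.getD_insert]
      rename_i hmem
      simp only [hmem, Bool.true_and]
      split <;> simp_all
    · rename_i hmem
      simp only [Bool.not_eq_true] at hmem
      simp [hmem]

theorem pvALoop_getD (document word_features negationwords : List String)
    (lst : List Int) (d : PySem.Dict String Bool) (k : String) :
    (lst.foldl (pvAStep document word_features negationwords) d).getD k false
      = (d.getD k false || lst.any (fun i => pvAHit document word_features negationwords i k)) := by
  induction lst generalizing d with
  | nil => simp
  | cons x t ih =>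
    simp only [List.foldl_cons, List.any_cons]
    rw [ih, pvAStep_getD, Bool.or_assoc]

-- the loop never changes the key list: every key it inserts is already present
theorem pvAStep_keys (document word_features negationwords : List String)
    (d : PySem.Dict String Bool) (i : Int)
    (h : ∀ w ∈ word_features, ("V_" ++ w) ∈ d.keys ∧ ("V_NOT" ++ w) ∈ d.keys) :
    (pvAStep document word_features negationwords d i).keys = d.keys := by
  unfold pvAStep
  split
  · split
    · rename_i hmem
      simp only [decide_eq_true_eq] at hmem
      exact PySem.Dict.keys_insert_of_contains d _
        ((PySem.Dict.contains_iff_mem_keys d _).mpr (h _ hmem).2)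
    · rfl
  · split
    · rename_i hmem
      simp only [decide_eq_true_eq] at hmem
      exact PySem.Dict.keys_insert_of_contains d _
        ((PySem.Dict.contains_iff_mem_keys d _).mpr (h _ hmem).1)
    · rfl

theorem pvALoop_keys (document word_features negationwords : List String)
    (lst : List Int) (d : PySem.Dict String Bool)
    (h : ∀ w ∈ word_features, ("V_" ++ w) ∈ d.keys ∧ ("V_NOT" ++ w) ∈ d.keys) :
    (lst.foldl (pvAStep document word_features negationwords) d).keys = d.keys := by
  induction lst generalizing d with
  | nil => rfl
  | cons x t ih =>
    simp only [List.foldl_cons]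
    rw [ih _ (by rw [pvAStep_keys _ _ _ _ _ h]; exact h),
        pvAStep_keys _ _ _ _ _ h]

-- keys of both initial builds (same for A's init and B's dict)
theorem pvBuild_keys (f : String → Bool) (g : String → Bool) (word_features : List String) :
    (word_features.foldl (fun d w => d.insert ("V_NOT" ++ w) (f w))
      (word_features.foldl (fun d w => d.insert ("V_" ++ w) (g w))
        (PySem.Dict.empty : PySem.Dict String Bool))).keys
    = PySem.Set.update (PySem.Set.update [] (word_features.map (fun w => "V_" ++ w)))
        (word_features.map (fun w => "V_NOT" ++ w)) := by
  rw [PySem.Dict.keys_foldl_insert_key word_features (fun w => "V_NOT" ++ w) (fun _ w => f w),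
      PySem.Dict.keys_foldl_insert_key word_features (fun w => "V_" ++ w) (fun _ w => g w),
      PySem.Dict.keys_empty]

theorem pvBuild_nodup (f : String → Bool) (g : String → Bool) (word_features : List String) :
    (word_features.foldl (fun d w => d.insert ("V_NOT" ++ w) (f w))
      (word_features.foldl (fun d w => d.insert ("V_" ++ w) (g w))
        (PySem.Dict.empty : PySem.Dict String Bool))).keys.Nodup := by
  exact PySem.Dict.nodup_keys_foldl_insert_key word_features (fun w => "V_NOT" ++ w) (fun _ w => f w) _
    (PySem.Dict.nodup_keys_foldl_insert_key word_features (fun w => "V_" ++ w) (fun _ w => g w) _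
      PySem.Dict.nodup_keys_empty)

theorem pvIsNegB_eq (negationwords : List String) (w : String) :
    pvIsNegB negationwords w = (decide (w ∈ negationwords) || PySem.Str.endswith w "n't") := by
  unfold pvIsNegB
  congr 1
  exact decide_eq_decide.mpr (PySem.Set.mem_ofList _ _)

-- value of A at a V_ key, as a scan over the range
theorem pvA_value_V (document word_features negationwords : List String)
    (hpre : Pre_NOT_features document word_features negationwords)
    (w : String) (hw : w ∈ word_features) :
    ((PySem.List.pyRange 0 (document.length : Int) 1).any
        (fun i => pvAHit document word_features negationwords i ("V_" ++ w)))
      = decide (w ∈ pvVMarked document negationwords) := by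
  rw [Bool.eq_iff_iff]
  unfold pvVMarked
  simp only [List.any_eq_true, decide_eq_true_eq, PySem.Set.mem_ofList, List.mem_map,
    List.mem_filter, PySem.List.mem_pyRange_one]
  constructor
  · rintro ⟨i, hi, hhit⟩
    unfold pvAHit at hhit
    by_cases hc : ((decide (i + 1 < (document.length : Int))) &&
        (decide (PySem.List.pyGetD document i "" ∈ negationwords) ||
          PySem.Str.endswith (PySem.List.pyGetD document i "") "n't")) = true
    · rw [if_pos hc] at hhit
      simp only [Bool.and_eq_true, decide_eq_true_eq, beq_iff_eq] at hhit
      obtain ⟨h1, h2⟩ := hhit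
      rw [pvVNOT_eq] at h2
      exact absurd (pvKey_inj h2 ▸ hw) (hpre _ h1)
    · rw [if_neg hc] at hhit
      simp only [Bool.and_eq_true, decide_eq_true_eq, beq_iff_eq] at hhit
      obtain ⟨h1, h2⟩ := hhit
      refine ⟨i, ⟨hi, ?_⟩, (pvKey_inj h2).symm⟩
      rw [pvIsNegB_eq]
      by_cases hlt : i + 1 < (document.length : Int)
      · simp only [hlt, decide_true, Bool.true_and, Bool.or_eq_true, not_or,
          Bool.not_eq_true] at hc
        simp only [hc.1, hc.2]
        simp
      · have hi1 : i = (document.length : Int) - 1 := by omega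
        simp [hi1]
  · rintro ⟨j, ⟨⟨hj0, hjn⟩, hpred⟩, hjw⟩
    refine ⟨j, ⟨hj0, hjn⟩, ?_⟩
    unfold pvAHit
    rw [pvIsNegB_eq] at hpred
    simp only [Bool.or_eq_true, decide_eq_true_eq, Bool.not_eq_true'] at hpred
    have hcfalse : ¬(((decide (j + 1 < (document.length : Int))) &&
        (decide (PySem.List.pyGetD document j "" ∈ negationwords) ||
          PySem.Str.endswith (PySem.List.pyGetD document j "") "n't")) = true) := by
      rcases hpred with h | h
      · have : ¬(j + 1 < (document.length : Int)) := by omega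
        simp [this]
      · simp only [h, Bool.and_false]
        simp
    rw [if_neg hcfalse]
    simp [hjw, hw]

-- value of A at a V_NOT key, as a scan over the range
theorem pvA_value_NOT (document word_features negationwords : List String)
    (hpre : Pre_NOT_features document word_features negationwords)
    (u : String) (hu : u ∈ word_features) :
    ((PySem.List.pyRange 0 (document.length : Int) 1).any
        (fun i => pvAHit document word_features negationwords i ("V_NOT" ++ u)))
      = decide (u ∈ pvNotMarked document negationwords) := by
  rw [Bool.eq_iff_iff]
  unfold pvNotMarked
  simp only [List.any_eq_true, decide_eq_true_eq, PySem.Set.mem_ofList, List.mem_map,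
    List.mem_filter, PySem.List.mem_pyRange_one]
  constructor
  · rintro ⟨i, hi, hhit⟩
    unfold pvAHit at hhit
    by_cases hc : ((decide (i + 1 < (document.length : Int))) &&
        (decide (PySem.List.pyGetD document i "" ∈ negationwords) ||
          PySem.Str.endswith (PySem.List.pyGetD document i "") "n't")) = true
    · rw [if_pos hc] at hhit
      simp only [Bool.and_eq_true, decide_eq_true_eq, beq_iff_eq] at hhit
      obtain ⟨h1, h2⟩ := hhit
      rw [pvVNOT_eq u, pvVNOT_eq] at h2
      have hnxt := (String.append_right_inj "NOT").mp (pvKey_inj h2)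
      simp only [Bool.and_eq_true, decide_eq_true_eq] at hc
      refine ⟨i + 1, ⟨⟨by omega, hc.1⟩, ?_⟩, ?_⟩
      · rw [pvIsNegB_eq]
        simp only [add_sub_cancel_right]
        exact hc.2
      · rw [← hnxt]
    · rw [if_neg hc] at hhit
      simp only [Bool.and_eq_true, decide_eq_true_eq, beq_iff_eq] at hhit
      obtain ⟨h1, h2⟩ := hhit
      rw [pvVNOT_eq] at h2
      have := pvKey_inj h2
      exact absurd (this ▸ h1) (hpre u hu)
  · rintro ⟨j, ⟨⟨hj1, hjn⟩, hpred⟩, hju⟩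
    refine ⟨j - 1, ⟨by omega, by omega⟩, ?_⟩
    unfold pvAHit
    rw [pvIsNegB_eq] at hpred
    have hj : j - 1 + 1 = j := by ring
    rw [if_pos (by rw [hj]; simp only [Bool.and_eq_true, Bool.or_eq_true]
                   exact ⟨by simp; omega, by simpa using hpred⟩)]
    rw [hj, hju]
    simp [hu]

-- ===== VERDICT (by name: the statement is the Claim_ definition above) =====
theorem NOT_features_spec : Claim_equal_NOT_features := by
  intro document word_features negationwords _hdom hpre
  unfold Spec_NOT_features NOT_features NOT_features_alt
  have hkeysB := pvBuild_keys (fun w => decide (w ∈ pvNotMarked document negationwords))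
    (fun w => decide (w ∈ pvVMarked document negationwords)) word_features
  have hkeys0 := pvBuild_keys (fun _ => false) (fun _ => false) word_features
  have hnodB := pvBuild_nodup (fun w => decide (w ∈ pvNotMarked document negationwords))
    (fun w => decide (w ∈ pvVMarked document negationwords)) word_features
  have hnod0 := pvBuild_nodup (fun _ => false) (fun _ => false) word_features
  -- the loop leaves the key list unchanged
  have hcont : ∀ w ∈ word_features,
      ("V_" ++ w) ∈ (word_features.foldl (fun d w => d.insert ("V_NOT" ++ w) false)
        (word_features.foldl (fun d w => d.insert ("V_" ++ w) false)
          (PySem.Dict.empty : PySem.Dict String Bool))).keys ∧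
      ("V_NOT" ++ w) ∈ (word_features.foldl (fun d w => d.insert ("V_NOT" ++ w) false)
        (word_features.foldl (fun d w => d.insert ("V_" ++ w) false)
          (PySem.Dict.empty : PySem.Dict String Bool))).keys := by
    intro w hw
    rw [hkeys0]
    constructor
    · exact (PySem.Set.mem_update _ _ _).mpr (Or.inl
        ((PySem.Set.mem_update _ _ _).mpr (Or.inr (List.mem_map_of_mem hw))))
    · exact (PySem.Set.mem_update _ _ _).mpr (Or.inr (List.mem_map_of_mem hw))
  have hkeysA := pvALoop_keys document word_features negationwords
    (PySem.List.pyRange 0 (document.length : Int) 1) _ hcont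
  have hnodA : ((PySem.List.pyRange 0 (document.length : Int) 1).foldl
      (pvAStep document word_features negationwords)
      (word_features.foldl (fun d w => d.insert ("V_NOT" ++ w) false)
        (word_features.foldl (fun d w => d.insert ("V_" ++ w) false) PySem.Dict.empty))).keys.Nodup := by
    rw [hkeysA]; exact hnod0
  rw [PySem.Dict.items_eq_map_keys _ hnodA false, PySem.Dict.items_eq_map_keys _ hnodB false,
      hkeysA, hkeys0, hkeysB]
  refine List.map_congr_left (fun k hk => ?_)
  -- each key is a V_ key or a V_NOT key of a feature word
  have hk' : (∃ w ∈ word_features, k = "V_" ++ w) ∨ (∃ w ∈ word_features, k = "V_NOT" ++ w) := by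
    rcases (PySem.Set.mem_update _ _ _).mp hk with h | h
    · rcases (PySem.Set.mem_update _ _ _).mp h with h' | h'
      · cases h'
      · rcases List.mem_map.mp h' with ⟨w, hw, hkw⟩
        exact Or.inl ⟨w, hw, hkw.symm⟩
    · rcases List.mem_map.mp h with ⟨w, hw, hkw⟩
      exact Or.inr ⟨w, hw, hkw.symm⟩
  have hz : ∀ k', (word_features.foldl (fun d w => d.insert ("V_NOT" ++ w) false)
      (word_features.foldl (fun d w => d.insert ("V_" ++ w) false)
        (PySem.Dict.empty : PySem.Dict String Bool))).getD k' false = false := by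
    intro k'
    exact pvGetD_fold_false _ word_features _
      (fun k'' => pvGetD_fold_false _ word_features _ (fun k''' => PySem.Dict.getD_empty _ _) k'') k'
  refine Prod.ext rfl ?_
  simp only
  rw [pvALoop_getD, hz, Bool.false_or]
  rcases hk' with ⟨w, hw, rfl⟩ | ⟨u, hu, rfl⟩
  · -- V_ key: B's phase-2 inserts only V_NOT keys, which differ from this key under Pre_
    rw [pvGetD_fold_insert_not_mem (fun w => "V_NOT" ++ w) _ word_features _ _
        (fun a ha hcol => by
          have hcol' : "V_NOT" ++ a = "V_" ++ w := hcol
          rw [pvVNOT_eq] at hcol'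
          exact hpre a ha (pvKey_inj hcol' ▸ hw)),
      pvGetD_fold_insert_mem (fun w => "V_" ++ w) _ word_features _ w hw
        (fun a _ h => pvKey_inj h)]
    exact pvA_value_V document word_features negationwords hpre w hw
  · rw [pvGetD_fold_insert_mem (fun w => "V_NOT" ++ w) _ word_features _ u hu
        (fun a _ h => by
          have h' : "V_NOT" ++ a = "V_NOT" ++ u := h
          rw [pvVNOT_eq a, pvVNOT_eq u] at h'
          exact (String.append_right_inj "NOT").mp (pvKey_inj h'))]
    exact pvA_value_NOT document word_features negationwords hpre u hu
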